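-- pv_equiv track=rewrite | github.com/DARC-e-V/50ohm | renderer/fifty_ohm_latex_slide_renderer.py | _convert_displaymath
-- ===== SOURCE A (Python) =====
-- def _convert_displaymath(text):
--     """
--     Wandelt Zeilen, die exakt aus $...$ bestehen (ohne weitere Zeichen), in $$...$$ um.
--     Falls \begin{split} enthalten ist, wird stattdessen \\[ ... \\] verwendet.
--     """
--
--     def repl(line):
--         stripped = line.strip()
--         if (
--             stripped.startswith("$")
--             and stripped.endswith("$")
--             and len(stripped) > 2
--             and stripped.count("$") == 2
--             and line == stripped  # keine Einrückung, keine weiteren Zeichen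
--         ):
--             content = stripped[1:-1]
--             if "\\begin{split}" in content:
--                 return "\\[" + content + "\\]"
--             else:
--                 return "$$" + content + "$$"
--         return line
--
--     # Zeilenweise anwenden
--     return "\n".join(repl(l) for l in text.split("\n"))
-- ===== SOURCE B (Python) =====
-- def _flush(state, buf):
--     # end-of-line contribution of the automaton's pending candidate
--     if state == 1:
--         return "$" + "".join(buf)
--     if state == 2:
--         body = "".join(buf)
--         if not body:
--             return "$$"
--         if "\\begin{split}" in body:
--             return "\\[" + body + "\\]"
--         return "$$" + body + "$$"
--     return ""
--
--
-- def _convert_displaymath(text):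
--     # Single-pass character-level state machine: no split into lines, no
--     # strip/count predicate.  States: 0 = at line start, 1 = inside a '$...'
--     # candidate body, 2 = candidate closed by a second '$', 3 = ordinary line
--     # (streamed through verbatim).  A candidate is converted only when the
--     # line boundary is reached while in state 2 with a nonempty body.
--     out = []
--     state, buf = 0, []
--     for ch in text:
--         if ch == "\n":
--             out.append(_flush(state, buf))
--             out.append("\n")
--             state, buf = 0, []
--         elif state == 0:
--             if ch == "$":
--                 state, buf = 1, []
--             else:
--                 state = 3
--                 out.append(ch)
--         elif state == 1:
--             if ch == "$":
--                 state = 2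
--             else:
--                 buf.append(ch)
--         elif state == 2:
--             out.append("$" + "".join(buf) + "$" + ch)
--             state = 3
--         else:
--             out.append(ch)
--     out.append(_flush(state, buf))
--     return "".join(out)
-- ===== Notes on version B (the rewrite author's own statement) =====
-- stated objective: alternative
-- what changed: Replaces A's split-into-lines / per-line strip-count-startswith predicate / join pipeline with a single-pass character-level state machine (states: line start, inside $-candidate body, candidate closed, ordinary line) that never materialises line strings and converts a candidate only when a line boundary is reached in the closed state with nonempty body.
import Mathlib
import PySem

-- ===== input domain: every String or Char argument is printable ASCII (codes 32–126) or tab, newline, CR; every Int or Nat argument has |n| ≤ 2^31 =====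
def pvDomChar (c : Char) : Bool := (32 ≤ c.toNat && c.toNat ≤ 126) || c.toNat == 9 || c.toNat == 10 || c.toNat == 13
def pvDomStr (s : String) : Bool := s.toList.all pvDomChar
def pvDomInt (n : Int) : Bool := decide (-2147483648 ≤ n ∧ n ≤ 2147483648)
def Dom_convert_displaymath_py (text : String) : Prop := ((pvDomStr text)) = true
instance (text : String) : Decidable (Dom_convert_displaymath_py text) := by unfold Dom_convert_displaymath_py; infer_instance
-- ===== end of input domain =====

-- B replaces A's split/per-line-predicate/join pipeline by a single-pass character-level
-- state machine (alternative decomposition, same asymptotic cost).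

-- ===== PORT A =====
-- repl(line) from A, on char lists
def pvReplA (line : List Char) : List Char :=
  let stripped := PySem.Chars.strip line
  if PySem.Chars.startswith stripped ['$'] && PySem.Chars.endswith stripped ['$'] &&
      decide (2 < PySem.Chars.len stripped) && (PySem.Chars.count stripped ['$'] == 2) &&
      (line == stripped) then
    let content := PySem.Chars.slice stripped (some 1) (some (-1))
    if PySem.Chars.isIn ("\\begin{split}".toList) content then
      ('\\' :: '[' :: content) ++ ['\\', ']']
    else
      ('$' :: '$' :: content) ++ ['$', '$']
  else line

def convert_displaymath_py (text : String) : String :=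
  String.ofList (PySem.Chars.join ['\n'] ((PySem.Chars.splitOn text.toList ['\n']).map pvReplA))

-- ===== PORT B =====
-- _flush(state, buf) from Source B
def pvFlushB (state : Nat) (buf : List Char) : List Char :=
  if state = 1 then '$' :: buf
  else if state = 2 then
    if buf = [] then ['$', '$']
    else if PySem.Chars.isIn ("\\begin{split}".toList) buf then
      ('\\' :: '[' :: buf) ++ ['\\', ']']
    else
      ('$' :: '$' :: buf) ++ ['$', '$']
  else []

-- the character loop of Source B (the `out` accumulator becomes the returned concatenation)
def pvRunB : List Char → Nat → List Char → List Char
  | [], state, buf => pvFlushB state buf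
  | ch :: rest, state, buf =>
    if ch = '\n' then pvFlushB state buf ++ '\n' :: pvRunB rest 0 []
    else if state = 0 then
      if ch = '$' then pvRunB rest 1 []
      else ch :: pvRunB rest 3 buf
    else if state = 1 then
      if ch = '$' then pvRunB rest 2 buf
      else pvRunB rest 1 (buf ++ [ch])
    else if state = 2 then
      (('$' :: buf) ++ '$' :: [ch]) ++ pvRunB rest 3 buf
    else ch :: pvRunB rest state buf

def convert_displaymath_py_alt (text : String) : String :=
  String.ofList (pvRunB text.toList 0 [])

-- ===== PRECONDITION & SPEC =====
def Spec_convert_displaymath_py (text : String) (out : String) : Prop := out = convert_displaymath_py_alt text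
instance (text : String) (out : String) : Decidable (Spec_convert_displaymath_py text out) := by unfold Spec_convert_displaymath_py; infer_instance

-- ===== CLAIM (what is proved, stated in full; the proofs are below) =====
def Claim_equal_convert_displaymath_py : Prop := ∀ (text : String), Dom_convert_displaymath_py text → Spec_convert_displaymath_py text (convert_displaymath_py text)

-- ===== LEMMAS AND PROOFS =====
-- the per-line value both programs compute, in closed form (proof-only helper)
def pvLineB (line : List Char) : List Char :=
  if decide (2 < line.length) && (PySem.List.pyGet? line 0 == some '$') &&
      (PySem.List.pyGet? line (-1) == some '$') &&
      !(PySem.Chars.isIn ['$'] (PySem.Chars.slice line (some 1) (some (-1)))) then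
    let body := PySem.Chars.slice line (some 1) (some (-1))
    if PySem.Chars.isIn ("\\begin{split}".toList) body then
      ('\\' :: '[' :: body) ++ ['\\', ']']
    else
      ('$' :: '$' :: body) ++ ['$', '$']
  else line

def pvConsHd (pre : List Char) : List (List Char) → List (List Char)
  | [] => []
  | p :: ps => (pre ++ p) :: ps
def pvSplitNL : List Char → List (List Char)
  | [] => [[]]
  | c :: rest => if c = '\n' then [] :: pvSplitNL rest else pvConsHd [c] (pvSplitNL rest)
theorem pvSplitNL_ne_nil (l : List Char) : pvSplitNL l ≠ [] := by
  induction l with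
  | nil => simp [pvSplitNL]
  | cons c rest ih =>
    simp only [pvSplitNL]
    split
    · simp
    · cases h : pvSplitNL rest with
      | nil => exact absurd h ih
      | cons p ps => simp [pvConsHd]
theorem pvGo_eq (l : List Char) : ∀ (fuel : Nat) (cur : List Char) (acc : List (List Char)), l.length ≤ fuel →
    PySem.Chars.splitOn.go ['\n'] fuel l cur acc = acc.reverse ++ pvConsHd cur.reverse (pvSplitNL l) := by
  induction l with
  | nil =>
    intro fuel cur acc _
    cases fuel <;> simp [PySem.Chars.splitOn.go, pvSplitNL, pvConsHd]
  | cons c rest ih =>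
    intro fuel cur acc hf
    cases fuel with
    | zero => simp at hf
    | succ f =>
      simp only [PySem.Chars.splitOn.go]
      by_cases hc : c = '\n'
      · subst hc
        rw [if_pos (by simp [List.isPrefixOf])]
        simp only [List.length_cons, List.length_nil, List.drop_succ_cons, List.drop_zero]
        rw [ih f [] (cur.reverse :: acc) (by simpa using hf)]
        obtain ⟨p, ps, hp⟩ : ∃ p ps, pvSplitNL rest = p :: ps := by
          cases h : pvSplitNL rest with
          | nil => exact absurd h (pvSplitNL_ne_nil rest)
          | cons p ps => exact ⟨p, ps, rfl⟩
        simp [pvSplitNL, hp, pvConsHd]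
      · have hpre : (['\n'].isPrefixOf (c :: rest)) = false := by
          simp only [List.isPrefixOf, Bool.and_true, beq_eq_false_iff_ne, ne_eq]
          exact fun h => hc h.symm
        rw [if_neg (by simp [hpre])]
        rw [ih f (c :: cur) acc (by simpa using hf)]
        obtain ⟨p, ps, hp⟩ : ∃ p ps, pvSplitNL rest = p :: ps := by
          cases h : pvSplitNL rest with
          | nil => exact absurd h (pvSplitNL_ne_nil rest)
          | cons p ps => exact ⟨p, ps, rfl⟩
        simp [pvSplitNL, hp, pvConsHd, hc]
theorem pvSplitOn_eq (l : List Char) : PySem.Chars.splitOn l ['\n'] = pvSplitNL l := by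
  rw [PySem.Chars.splitOn, pvGo_eq l (l.length+1) [] [] (by omega)]
  obtain ⟨p, ps, hp⟩ : ∃ p ps, pvSplitNL l = p :: ps := by
    cases h : pvSplitNL l with
    | nil => exact absurd h (pvSplitNL_ne_nil l)
    | cons p ps => exact ⟨p, ps, rfl⟩
  simp [hp, pvConsHd]
theorem pvCountGo_eq (l : List Char) : ∀ (fuel acc : Nat), l.length ≤ fuel →
    PySem.Chars.count.go ['$'] fuel l acc = acc + l.count '$' := by
  induction l with
  | nil => intro fuel acc _; cases fuel <;> simp [PySem.Chars.count.go]
  | cons c rest ih =>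
    intro fuel acc hf
    cases fuel with
    | zero => simp at hf
    | succ f =>
      simp only [PySem.Chars.count.go]
      by_cases hc : c = '$'
      · subst hc
        rw [if_pos (by simp [List.isPrefixOf])]
        simp only [List.length_cons, List.length_nil, List.drop_succ_cons, List.drop_zero]
        rw [ih f (acc+1) (by simpa using hf)]
        simp
        omega
      · have hpre : (['$'].isPrefixOf (c :: rest)) = false := by
          simp only [List.isPrefixOf, Bool.and_true, beq_eq_false_iff_ne, ne_eq]
          exact fun h => hc h.symm
        rw [if_neg (by simp [hpre])]
        rw [ih f acc (by simpa using hf)]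
        simp [hc]
theorem pvCount_dollar (l : List Char) : PySem.Chars.count l ['$'] = l.count '$' := by
  rw [PySem.Chars.count, if_neg (by simp), pvCountGo_eq l l.length 0 (le_refl _)]
  omega
theorem pvSplitNL_no (l : List Char) (h : '\n' ∉ l) : pvSplitNL l = [l] := by
  induction l with
  | nil => rfl
  | cons c rest ih =>
    simp only [List.mem_cons, not_or] at h
    simp [pvSplitNL, if_neg (Ne.symm h.1), ih h.2, pvConsHd]
theorem pvSplitNL_app (pre suf : List Char) (h : '\n' ∉ pre) :
    pvSplitNL (pre ++ '\n' :: suf) = pre :: pvSplitNL suf := by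
  induction pre with
  | nil => simp [pvSplitNL]
  | cons c rest ih =>
    simp only [List.mem_cons, not_or] at h
    have hc : ¬ c = '\n' := fun hh => h.1 hh.symm
    simp [pvSplitNL, hc, ih h.2, pvConsHd]
theorem pvStrip_id (mid : List Char) : PySem.Chars.strip ('$'::mid++['$']) = '$'::mid++['$'] := by
  have h : PySem.Chars.isspace '$' = false := by decide
  simp [PySem.Chars.strip, PySem.Chars.lstrip, PySem.Chars.rstrip, h, List.reverse_append]
theorem pvSlice_mid (mid : List Char) : PySem.List.slice ('$'::mid++['$']) (some 1) (some (-1)) = mid := by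
  simp [PySem.List.slice, PySem.List.clampIdx]
  rw [if_neg (by omega)]
  simp
theorem pvGet0 (l : List Char) (h : l ≠ []) : PySem.List.pyGet? l 0 = l.head? := by
  have : 0 < l.length := List.length_pos_iff.mpr h
  simp [PySem.List.pyGet?, PySem.List.pyIdx?, this, List.head?_eq_getElem?]
theorem pvGetNeg1 (l : List Char) (h : l ≠ []) : PySem.List.pyGet? l (-1) = l.getLast? := by
  have hl : 0 < l.length := List.length_pos_iff.mpr h
  simp only [PySem.List.pyGet?, PySem.List.pyIdx?]
  rw [if_neg (by omega), if_pos (show -(l.length:Int) ≤ -1 by omega)]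
  simp [List.getLast?_eq_getElem?]
theorem pvDecomp (l : List Char) (hlen : 2 < l.length) (h0 : l.head? = some '$')
    (hl : l.getLast? = some '$') : ∃ mid, l = '$' :: mid ++ ['$'] ∧ mid ≠ [] := by
  obtain ⟨init, rfl⟩ := List.getLast?_eq_some_iff.mp hl
  cases init with
  | nil => simp at hlen
  | cons c t =>
    simp only [List.cons_append, List.head?_cons, Option.some.injEq] at h0
    subst h0
    refine ⟨t, rfl, ?_⟩
    intro h; subst h; simp at hlen
theorem pvLineB_conv (mid : List Char) (hne : mid ≠ []) (hnd : '$' ∉ mid) :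
    pvLineB ('$' :: mid ++ ['$']) = pvFlushB 2 mid := by
  unfold pvLineB
  have hlen2 : (decide (2 < ('$'::mid++['$']).length)) = true := by
    have := List.length_pos_iff.mpr hne
    simp; omega
  have hg0 : (PySem.List.pyGet? ('$'::mid++['$']) 0 == some '$') = true := by
    rw [pvGet0 _ (by simp)]; simp
  have hg1 : (PySem.List.pyGet? ('$'::mid++['$']) (-1) == some '$') = true := by
    rw [pvGetNeg1 _ (by simp)]
    have h2 : ('$' :: (mid ++ ['$'])).getLast? = some '$' := by
      rw [show ('$' :: (mid ++ ['$'])) = ('$' :: mid) ++ ['$'] from rfl, List.getLast?_concat]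
    simp [h2]
  have hslice : PySem.Chars.slice ('$'::mid++['$']) (some 1) (some (-1)) = mid := by
    simp only [PySem.Chars.slice_eq_listSlice]
    exact pvSlice_mid mid
  have hisin : (PySem.Chars.isIn ['$'] mid) = false := by
    rw [PySem.Chars.isIn_eq_false_iff, List.singleton_infix_iff]
    exact hnd
  simp only [hlen2, hg0, hg1, hslice, hisin, Bool.and_self, Bool.not_false, if_pos]
  simp [pvFlushB, hne]

theorem pvLineB_id (line : List Char)
    (hP : ¬ ∃ mid, line = '$' :: mid ++ ['$'] ∧ mid ≠ [] ∧ '$' ∉ mid) : pvLineB line = line := by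
  unfold pvLineB
  have hB : (decide (2 < line.length) && (PySem.List.pyGet? line 0 == some '$') &&
      (PySem.List.pyGet? line (-1) == some '$') &&
      !(PySem.Chars.isIn ['$'] (PySem.Chars.slice line (some 1) (some (-1))))) = false := by
    by_contra hcon
    rw [Bool.not_eq_false] at hcon
    simp only [Bool.and_eq_true, decide_eq_true_eq, beq_iff_eq, Bool.not_eq_true'] at hcon
    obtain ⟨⟨⟨h1, h2⟩, h3⟩, h4⟩ := hcon
    have hne : line ≠ [] := by intro h; subst h; simp at h1
    rw [pvGet0 _ hne] at h2
    rw [pvGetNeg1 _ hne] at h3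
    obtain ⟨mid, rfl, hnemid⟩ := pvDecomp line h1 h2 h3
    have hslice : PySem.Chars.slice ('$'::mid++['$']) (some 1) (some (-1)) = mid := by
      simp only [PySem.Chars.slice_eq_listSlice]
      exact pvSlice_mid mid
    rw [hslice, PySem.Chars.isIn_eq_false_iff, List.singleton_infix_iff] at h4
    exact hP ⟨mid, rfl, hnemid, h4⟩
  simp only [hB, Bool.false_eq_true, if_false]

theorem pvLine_eq (line : List Char) : pvReplA line = pvLineB line := by
  by_cases hP : ∃ mid, line = '$' :: mid ++ ['$'] ∧ mid ≠ [] ∧ '$' ∉ mid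
  · obtain ⟨mid, rfl, hne, hnd⟩ := hP
    rw [pvLineB_conv mid hne hnd]
    unfold pvReplA
    rw [pvStrip_id]
    have hsw : PySem.Chars.startswith ('$'::mid++['$']) ['$'] = true := by
      simp [PySem.Chars.startswith, List.isPrefixOf]
    have hew : PySem.Chars.endswith ('$'::mid++['$']) ['$'] = true := by
      simp [PySem.Chars.endswith, List.isSuffixOf, List.reverse_append, List.isPrefixOf]
    have hlen : (decide (2 < PySem.Chars.len ('$'::mid++['$']))) = true := by
      have := List.length_pos_iff.mpr hne
      simp [PySem.Chars.len]; omega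
    have hcnt : (PySem.Chars.count ('$'::mid++['$']) ['$'] == 2) = true := by
      rw [pvCount_dollar]
      simp [List.count_append, List.count_eq_zero.mpr hnd]
    have hslice : PySem.Chars.slice ('$'::mid++['$']) (some 1) (some (-1)) = mid := by
      simp only [PySem.Chars.slice_eq_listSlice]
      exact pvSlice_mid mid
    simp only [hsw, hew, hlen, hcnt, hslice, Bool.and_self, beq_self_eq_true, if_pos]
    simp [pvFlushB, hne]
  · rw [pvLineB_id line hP]
    unfold pvReplA
    have hA : (PySem.Chars.startswith (PySem.Chars.strip line) ['$'] &&
        PySem.Chars.endswith (PySem.Chars.strip line) ['$'] &&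
        decide (2 < PySem.Chars.len (PySem.Chars.strip line)) &&
        (PySem.Chars.count (PySem.Chars.strip line) ['$'] == 2) &&
        (line == PySem.Chars.strip line)) = false := by
      by_contra hcon
      rw [Bool.not_eq_false] at hcon
      simp only [Bool.and_eq_true, beq_iff_eq] at hcon
      obtain ⟨⟨⟨⟨h1, h2⟩, h3⟩, h4⟩, h5⟩ := hcon
      rw [← h5] at h1 h2 h3 h4
      simp only [PySem.Chars.startswith] at h1
      simp only [PySem.Chars.endswith] at h2
      have hpre : ['$'] <+: line := List.isPrefixOf_iff_prefix.mp h1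
      have hsuf : ['$'] <:+ line := List.isSuffixOf_iff_suffix.mp h2
      have hlen : 2 < line.length := by simpa [PySem.Chars.len] using h3
      have h0 : line.head? = some '$' := by
        obtain ⟨t, rfl⟩ := hpre
        simp
      have hl : line.getLast? = some '$' := by
        obtain ⟨t, rfl⟩ := hsuf
        simp
      obtain ⟨mid, rfl, hne⟩ := pvDecomp line hlen h0 hl
      rw [pvCount_dollar] at h4
      simp [List.count_append] at h4
      exact hP ⟨mid, rfl, hne, List.count_eq_zero.mp h4⟩
    simp only [hA, Bool.false_eq_true, if_false]

theorem pvFirstSplit (a : Char) (l : List Char) (h : a ∈ l) :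
    ∃ pre suf, l = pre ++ a :: suf ∧ a ∉ pre := by
  induction l with
  | nil => simp at h
  | cons c rest ih =>
    by_cases hc : c = a
    · exact ⟨[], rest, by simp [hc], by simp⟩
    · have : a ∈ rest := by
        rcases List.mem_cons.mp h with h' | h'
        · exact absurd h'.symm hc
        · exact h'
      obtain ⟨p, s, hps, hnp⟩ := ih this
      exact ⟨c :: p, s, by simp [hps], by simp [hnp]; exact fun hh => hc hh.symm⟩

theorem pvRun_state3 (l : List Char) (h : '\n' ∉ l) (b : List Char) :
    ∀ k, pvRunB (l ++ k) 3 b = l ++ pvRunB k 3 b := by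
  induction l with
  | nil => intro k; simp
  | cons c rest ih =>
    simp only [List.mem_cons, not_or] at h
    intro k
    simp only [List.cons_append, pvRunB, if_neg (Ne.symm h.1)]
    norm_num
    exact ih h.2 k

theorem pvRun_state1 (mid : List Char) (h : '\n' ∉ mid) (hnd : '$' ∉ mid) (b : List Char) :
    ∀ k, pvRunB (mid ++ k) 1 b = pvRunB k 1 (b ++ mid) := by
  induction mid generalizing b with
  | nil => intro k; simp
  | cons c rest ih =>
    simp only [List.mem_cons, not_or] at h hnd
    intro k
    simp only [List.cons_append, pvRunB, if_neg (Ne.symm h.1), if_neg (Ne.symm hnd.1)]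
    norm_num
    rw [ih h.2 hnd.2 (b ++ [c])]
    simp

theorem pvRun_start_dollar (rest : List Char) (b : List Char) :
    pvRunB ('$' :: rest) 0 b = pvRunB rest 1 [] := by simp [pvRunB]
theorem pvRun_open (rest : List Char) (b : List Char) :
    pvRunB ('$' :: rest) 1 b = pvRunB rest 2 b := by simp [pvRunB]
theorem pvRun_close_bad (d : Char) (rest : List Char) (b : List Char) (hd : ¬ d = '\n') :
    pvRunB (d :: rest) 2 b = (('$' :: b) ++ '$' :: [d]) ++ pvRunB rest 3 b := by
  simp [pvRunB, hd]

-- the DFA over one newline-free line: terminated by end of input it yields pvLineB line,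
-- terminated by '\n' it yields pvLineB line ++ '\n' ++ the run over the remainder
theorem pvLine_run (line : List Char) (h : '\n' ∉ line) :
    (pvRunB line 0 [] = pvLineB line) ∧
    (∀ t, pvRunB (line ++ '\n' :: t) 0 [] = pvLineB line ++ '\n' :: pvRunB t 0 []) := by
  match line, h with
  | [], _ =>
    constructor
    · decide
    · intro t
      simp [pvRunB, pvFlushB, show pvLineB [] = [] from by decide]
  | c :: rest, h =>
    simp only [List.mem_cons, not_or] at h
    obtain ⟨hc, hrest⟩ := h
    by_cases hcd : c = '$'
    · subst hcd
      by_cases hd : '$' ∈ rest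
      · obtain ⟨mid, rest2, rfl, hnm⟩ := pvFirstSplit '$' rest hd
        have hmidnl : '\n' ∉ mid := fun hm => hrest (List.mem_append_left _ hm)
        have hrest2nl : '\n' ∉ rest2 := fun hm => hrest (by simp [hm])
        cases rest2 with
        | nil =>
          -- line = '$' :: mid ++ ['$']
          have hrun : ∀ k, pvRunB (('$' :: mid ++ ['$']) ++ k) 0 [] = pvRunB k 2 mid := by
            intro k
            rw [show ('$' :: mid ++ ['$']) ++ k = '$' :: (mid ++ ('$' :: k)) by simp,
              pvRun_start_dollar, pvRun_state1 mid hmidnl hnm [], List.nil_append, pvRun_open]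
          by_cases hne : mid = []
          · subst hne
            refine ⟨?_, fun t => ?_⟩
            · rw [show ('$' :: ([] ++ ['$']) : List Char) = ('$' :: [] ++ ['$']) ++ [] by simp, hrun]
              decide
            · rw [show ('$' :: ([] ++ ['$']) ++ '\n' :: t : List Char) = ('$' :: [] ++ ['$']) ++ ('\n' :: t) by simp, hrun]
              simp [pvRunB, pvFlushB, show pvLineB ['$', '$'] = ['$', '$'] from by decide]
          · have hlb : pvLineB ('$' :: (mid ++ ['$'])) = pvFlushB 2 mid := pvLineB_conv mid hne hnm
            refine ⟨?_, fun t => ?_⟩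
            · rw [show ('$' :: (mid ++ ['$'])) = ('$' :: mid ++ ['$']) ++ [] by simp, hrun]
              simp [pvRunB, hlb]
            · rw [show ('$' :: (mid ++ ['$']) ++ '\n' :: t) = ('$' :: mid ++ ['$']) ++ ('\n' :: t) by simp, hrun]
              simp [pvRunB, pvFlushB, hlb]
        | cons d rest3 =>
          have hdnl : ¬ d = '\n' := fun hh => hrest2nl (by simp [hh])
          have hr3nl : '\n' ∉ rest3 := fun hm => hrest2nl (by simp [hm])
          -- run: line ++ k ↦ line ++ pvRunB k 3 mid
          have hrun : ∀ k, pvRunB (('$' :: mid ++ '$' :: d :: rest3) ++ k) 0 [] =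
              ('$' :: mid ++ '$' :: d :: rest3) ++ pvRunB k 3 mid := by
            intro k
            rw [show ('$' :: mid ++ '$' :: d :: rest3) ++ k
                  = '$' :: (mid ++ ('$' :: (d :: (rest3 ++ k)))) by simp,
              pvRun_start_dollar, pvRun_state1 mid hmidnl hnm [], List.nil_append,
              pvRun_open, pvRun_close_bad d _ mid hdnl, pvRun_state3 rest3 hr3nl mid k]
            simp
          have hid : pvLineB ('$' :: (mid ++ '$' :: d :: rest3)) = '$' :: (mid ++ '$' :: d :: rest3) := by
            apply pvLineB_id
            rintro ⟨mid', heq, hne', hnd'⟩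
            have hrr : mid ++ '$' :: d :: rest3 = mid' ++ ['$'] := by
              simpa using heq
            have hmid' : mid' = (mid ++ '$' :: d :: rest3).dropLast := by
              rw [hrr]; simp
            have : '$' ∈ mid' := by
              rw [hmid', List.dropLast_append_cons]
              simp
            exact hnd' this
          refine ⟨?_, fun t => ?_⟩
          · have := hrun []
            simp only [List.append_nil] at this
            rw [show ('$' :: (mid ++ '$' :: d :: rest3)) = ('$' :: mid ++ '$' :: d :: rest3) by simp] at *
            rw [this, hid]
            simp [pvRunB, pvFlushB]
          · have := hrun ('\n' :: t)
            rw [show ('$' :: (mid ++ '$' :: d :: rest3)) = ('$' :: mid ++ '$' :: d :: rest3) by simp] at *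
            rw [this, hid]
            simp [pvRunB, pvFlushB]
      · -- '$' ∉ rest : line = '$' :: rest, never closed
        have hrun : ∀ k, pvRunB (('$' :: rest) ++ k) 0 [] = pvRunB k 1 rest := by
          intro k
          rw [show ('$' :: rest) ++ k = '$' :: (rest ++ k) by simp,
            pvRun_start_dollar, pvRun_state1 rest hrest hd []]
          simp
        have hid : pvLineB ('$' :: rest) = '$' :: rest := by
          apply pvLineB_id
          rintro ⟨mid', heq, hne', hnd'⟩
          have : rest = mid' ++ ['$'] := by simpa using heq
          exact hd (by simp [this])
        refine ⟨?_, fun t => ?_⟩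
        · have := hrun []
          simp only [List.append_nil] at this
          rw [this, hid]
          simp [pvRunB, pvFlushB]
        · rw [hrun ('\n' :: t), hid]
          simp [pvRunB, pvFlushB]
    · -- ordinary line: first char is neither '\n' nor '$'
      have hrun : ∀ k, pvRunB ((c :: rest) ++ k) 0 [] = c :: rest ++ pvRunB k 3 [] := by
        intro k
        simp only [List.cons_append, pvRunB, if_neg (Ne.symm hc), if_neg hcd]
        norm_num
        exact pvRun_state3 rest hrest [] k
      have hid : pvLineB (c :: rest) = c :: rest := by
        apply pvLineB_id
        rintro ⟨mid', heq, hne', hnd'⟩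
        have : c = '$' := by
          have := congrArg List.head? heq
          simpa using this
        exact hcd this
      refine ⟨?_, fun t => ?_⟩
      · have := hrun []
        simp only [List.append_nil] at this
        rw [this, hid]
        simp [pvRunB, pvFlushB]
      · rw [hrun ('\n' :: t), hid]
        simp [pvRunB, pvFlushB]

theorem pvRun_join : ∀ (n : Nat) (l : List Char), l.length ≤ n →
    pvRunB l 0 [] = PySem.Chars.join ['\n'] ((pvSplitNL l).map pvLineB) := by
  intro n
  induction n with
  | zero =>
    intro l h
    have : l = [] := List.eq_nil_of_length_eq_zero (by omega)
    subst this
    simp [pvSplitNL, PySem.Chars.join, List.intercalate]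
    decide
  | succ n ih =>
    intro l hlen
    by_cases hnl : '\n' ∈ l
    · obtain ⟨pre, suf, rfl, hpre⟩ := pvFirstSplit '\n' l hnl
      rw [(pvLine_run pre hpre).2 suf, pvSplitNL_app pre suf hpre,
        ih suf (by simp at hlen ⊢; omega)]
      obtain ⟨y, zs, hyz⟩ : ∃ y zs, pvSplitNL suf = y :: zs := by
        cases h : pvSplitNL suf with
        | nil => exact absurd h (pvSplitNL_ne_nil _)
        | cons y zs => exact ⟨y, zs, rfl⟩
      rw [hyz]
      simp [PySem.Chars.join, List.intercalate]
    · rw [(pvLine_run l hnl).1, pvSplitNL_no l hnl]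
      simp [PySem.Chars.join, List.intercalate]

-- ===== VERDICT (by name: the statement is the Claim_ definition above) =====
theorem convert_displaymath_py_spec : Claim_equal_convert_displaymath_py := by
  intro text _
  unfold Spec_convert_displaymath_py convert_displaymath_py convert_displaymath_py_alt
  rw [pvSplitOn_eq, pvRun_join (text.toList.length) _ (le_refl _)]
  rw [funext pvLine_eq]
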